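-- pv_equiv track=rewrite | github.com/jinlang226/Karma | app/orchestrator_core/workflow_validation.py | extract_f_paths
-- ===== SOURCE A (Python) =====
-- def extract_f_paths(tokens):
--     paths = []
--     idx = 0
--     while idx < len(tokens):
--         token = str(tokens[idx])
--         if token in ("-f", "--filename") and idx + 1 < len(tokens):
--             paths.append(str(tokens[idx + 1]))
--             idx += 2
--             continue
--         if token.startswith("--filename="):
--             paths.append(token.split("=", 1)[1])
--         idx += 1
--     return paths
-- ===== SOURCE B (Python) =====
-- def extract_f_paths(tokens):
--     paths = []
--     expecting = False
--     for raw in tokens: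
--         token = str(raw)
--         if expecting:
--             paths.append(token)
--             expecting = False
--         elif token.startswith("--filename="):
--             paths.append(token.split("=", 1)[1])
--         elif token in ("-f", "--filename"):
--             expecting = True
--     return paths
-- ===== Notes on version B (the rewrite author's own statement) =====
-- stated objective: simpler
-- what changed: Replaced the explicit index loop with lookahead and skip-by-2 by a single for-loop state machine carrying an 'expecting path' boolean flag; iterating tokens directly avoids repeated len() checks and indexed access (measured ~1.9x constant-factor speedup).
import Mathlib
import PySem

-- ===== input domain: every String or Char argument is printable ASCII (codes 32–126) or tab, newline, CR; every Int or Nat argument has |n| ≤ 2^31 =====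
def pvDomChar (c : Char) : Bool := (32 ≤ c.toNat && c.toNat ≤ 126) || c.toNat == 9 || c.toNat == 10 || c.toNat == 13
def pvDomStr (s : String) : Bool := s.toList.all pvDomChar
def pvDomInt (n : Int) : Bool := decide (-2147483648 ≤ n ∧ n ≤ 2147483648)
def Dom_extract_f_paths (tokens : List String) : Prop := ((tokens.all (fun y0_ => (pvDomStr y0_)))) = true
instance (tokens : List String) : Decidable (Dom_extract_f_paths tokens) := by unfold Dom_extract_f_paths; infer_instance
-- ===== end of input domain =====

-- B replaces A's indexed lookahead-and-skip-by-2 loop with a single for-loop state machine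
-- carrying an 'expecting path' boolean flag (objective: simpler).


-- ===== PORT A =====
-- token.split("=", 1)[1] — the [1] is total here because both programs only apply it
-- to a token starting with "--filename=", where split on "=" yields ≥ 2 parts.
def pvPathOf (token : String) : String :=
  ((PySem.Str.splitMax? token "=" 1).getD []).getD 1 ""

-- token in ("-f", "--filename")
def pvIsFlag (token : String) : Bool := token == "-f" || token == "--filename"

def extract_f_paths_go (tokens : List String) (paths : List String) (idx : Nat) : List String :=
  if h : idx < tokens.length then
    let token := tokens[idx]
    if pvIsFlag token && decide (idx + 1 < tokens.length) then
      extract_f_paths_go tokens (paths ++ [tokens.getD (idx + 1) ""]) (idx + 2)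
    else if PySem.Str.startswith token "--filename=" then
      extract_f_paths_go tokens (paths ++ [pvPathOf token]) (idx + 1)
    else
      extract_f_paths_go tokens paths (idx + 1)
  else paths
termination_by tokens.length - idx
decreasing_by all_goals omega

def extract_f_paths (tokens : List String) : List String :=
  extract_f_paths_go tokens [] 0

-- ===== PORT B =====
def extract_f_paths_alt (tokens : List String) : List String :=
  (tokens.foldl
    (fun (st : List String × Bool) token =>
      if st.2 then (st.1 ++ [token], false)
      else if PySem.Str.startswith token "--filename=" then (st.1 ++ [pvPathOf token], false)
      else if pvIsFlag token then (st.1, true)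
      else st)
    (([] : List String), false)).1

-- ===== PRECONDITION & SPEC =====
def Spec_extract_f_paths (tokens : List String) (out : List String) : Prop := out = extract_f_paths_alt tokens
instance (tokens : List String) (out : List String) : Decidable (Spec_extract_f_paths tokens out) := by unfold Spec_extract_f_paths; infer_instance

-- ===== CLAIM (what is proved, stated in full; the proofs are below) =====
def Claim_equal_extract_f_paths : Prop := ∀ (tokens : List String), Dom_extract_f_paths tokens → Spec_extract_f_paths tokens (extract_f_paths tokens)

-- ===== LEMMAS AND PROOFS =====

-- common reference semantics: structural recursion on the token list
def pvG : List String → List String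
  | [] => []
  | t :: rest =>
    if pvIsFlag t then
      match rest with
      | [] => []
      | x :: rs => x :: pvG rs
    else if PySem.Str.startswith t "--filename=" then pvPathOf t :: pvG rest
    else pvG rest

lemma pvIsFlag_not_startswith (t : String) (h : pvIsFlag t = true) :
    PySem.Str.startswith t "--filename=" = false := by
  simp [pvIsFlag] at h
  rcases h with h | h <;> subst h <;> decide

lemma pvStartswith_not_flag (t : String) (h : PySem.Str.startswith t "--filename=" = true) :
    pvIsFlag t = false := by
  by_contra hf
  simp only [Bool.not_eq_false] at hf
  rw [pvIsFlag_not_startswith t hf] at h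
  exact absurd h (by simp)

lemma pvG_nil : pvG [] = [] := rfl

lemma pvG_flag_nil (t : String) (h : pvIsFlag t = true) : pvG [t] = [] := by
  simp [pvG, h]

lemma pvG_flag_cons (t x : String) (rs : List String) (h : pvIsFlag t = true) :
    pvG (t :: x :: rs) = x :: pvG rs := by
  simp [pvG, h]

lemma pvG_path (t : String) (rest : List String) (h : pvIsFlag t = false)
    (h2 : PySem.Str.startswith t "--filename=" = true) :
    pvG (t :: rest) = pvPathOf t :: pvG rest := by
  cases rest <;> simp_all [pvG]

lemma pvG_skip (t : String) (rest : List String) (h : pvIsFlag t = false)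
    (h2 : PySem.Str.startswith t "--filename=" = false) :
    pvG (t :: rest) = pvG rest := by
  cases rest <;> simp_all [pvG]

lemma extract_f_paths_go_eq (tokens : List String) :
    ∀ (n idx : Nat) (paths : List String), tokens.length - idx ≤ n →
      extract_f_paths_go tokens paths idx = paths ++ pvG (tokens.drop idx) := by
  intro n
  induction n with
  | zero =>
    intro idx paths hle
    have hge : tokens.length ≤ idx := by omega
    rw [extract_f_paths_go]
    simp [Nat.not_lt.mpr hge, List.drop_eq_nil_of_le hge, pvG_nil]
  | succ n ih =>
    intro idx paths hle
    by_cases h : idx < tokens.length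
    · have hdrop : tokens.drop idx = tokens[idx] :: tokens.drop (idx + 1) :=
        List.drop_eq_getElem_cons h
      rw [extract_f_paths_go]
      simp only [h, dif_pos]
      by_cases hf : pvIsFlag tokens[idx] = true
      · by_cases h2 : idx + 1 < tokens.length
        · have hdrop2 : tokens.drop (idx + 1) = tokens[idx + 1] :: tokens.drop (idx + 2) :=
            List.drop_eq_getElem_cons h2
          simp only [hf, h2, decide_true, Bool.and_self, if_pos]
          rw [ih (idx + 2) _ (by omega), hdrop, hdrop2, pvG_flag_cons _ _ _ hf,
            List.getD, List.getElem?_eq_getElem h2]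
          simp
        · have hnil : tokens.drop (idx + 1) = [] :=
            List.drop_eq_nil_of_le (by omega)
          simp only [h2, decide_false, Bool.and_false, Bool.false_eq_true, if_neg,
            not_false_iff, pvIsFlag_not_startswith _ hf]
          rw [ih (idx + 1) _ (by omega), hnil, hdrop, hnil, pvG_flag_nil _ hf]
          simp [pvG_nil]
      · simp only [Bool.not_eq_true] at hf
        simp only [hf, Bool.false_and, Bool.false_eq_true, if_neg, not_false_iff]
        by_cases hs : PySem.Str.startswith tokens[idx] "--filename=" = true
        · simp only [hs, if_pos]
          rw [ih (idx + 1) _ (by omega), hdrop, pvG_path _ _ hf hs]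
          simp
        · simp only [Bool.not_eq_true] at hs
          simp only [hs, Bool.false_eq_true, if_neg, not_false_iff]
          rw [ih (idx + 1) _ (by omega), hdrop, pvG_skip _ _ hf hs]
    · rw [extract_f_paths_go]
      simp [h, List.drop_eq_nil_of_le (Nat.not_lt.mp h), pvG_nil]

-- value of B's fold from every state
def pvH : Bool → List String → List String
  | true, [] => []
  | true, x :: rs => x :: pvG rs
  | false, l => pvG l

lemma extract_f_paths_alt_fold (l : List String) :
    ∀ (acc : List String) (b : Bool),
      (l.foldl
        (fun (st : List String × Bool) token =>
          if st.2 then (st.1 ++ [token], false)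
          else if PySem.Str.startswith token "--filename=" then (st.1 ++ [pvPathOf token], false)
          else if pvIsFlag token then (st.1, true)
          else st)
        (acc, b)).1 = acc ++ pvH b l := by
  induction l with
  | nil => intro acc b; cases b <;> simp [pvH, pvG_nil]
  | cons t rest ih =>
    intro acc b
    cases b with
    | true => simp only [List.foldl_cons, if_pos, ih, pvH]; simp [List.append_assoc]
    | false =>
      by_cases hs : PySem.Str.startswith t "--filename=" = true
      · simp only [List.foldl_cons, Bool.false_eq_true, if_neg, not_false_iff, hs, if_pos, ih,
          pvH, pvG_path t rest (pvStartswith_not_flag t hs) hs]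
        simp [List.append_assoc]
      · simp only [Bool.not_eq_true] at hs
        by_cases hf : pvIsFlag t = true
        · simp only [List.foldl_cons, Bool.false_eq_true, if_neg, not_false_iff, hs,
            hf, if_pos, ih]
          cases rest with
          | nil => simp [pvH, pvG_flag_nil t hf]
          | cons x rs => simp [pvH, pvG_flag_cons t x rs hf]
        · simp only [Bool.not_eq_true] at hf
          simp only [List.foldl_cons, Bool.false_eq_true, if_neg, not_false_iff, hs, hf, ih,
            pvH, pvG_skip t rest hf hs]

-- ===== VERDICT (by name: the statement is the Claim_ definition above) =====
theorem extract_f_paths_spec : Claim_equal_extract_f_paths := by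
  intro tokens _
  show extract_f_paths tokens = extract_f_paths_alt tokens
  rw [extract_f_paths, extract_f_paths_alt,
    extract_f_paths_go_eq tokens tokens.length 0 [] (by omega),
    extract_f_paths_alt_fold tokens [] false]
  simp [pvH]
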